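-- pv_equiv track=rewrite | github.com/FabianTraxler/ag_binding_affinity | src/abag_affinity/utils/pdb_processing.py | order_substitutions
-- ===== SOURCE A (Python) =====
-- from collections import defaultdict, deque
-- from collections import defaultdict
--
-- def order_substitutions(substitutions):
--     """
--     Order substiutions to avoid chain overlaps (and thereby loss of chain information)
--     """
--     # Create a dependency graph with nodes as keys and values
--     graph = defaultdict(list)
--     for src, dest in substitutions.items():
--         graph[src].append(dest)
--
--     # Perform a topological sorting on the graph
--     sorted_nodes = []
--     visited = set()
--     stack = deque()
--
--     def visit(node):
--         if node not in visited:
--             visited.add(node)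
--             for neighbor in graph[node]:
--                 visit(neighbor)
--             stack.appendleft(node)
--
--     for node in list(graph.keys()):
--         visit(node)
--
--     # Apply substitutions in the sorted order
--     result = {}
--     for node in reversed(stack):
--         if node in substitutions:
--             result[node] = substitutions[node]
--
--     return result
-- ===== SOURCE B (Python) =====
-- def order_substitutions(substitutions):
--     """
--     Order substitutions to avoid chain overlaps (and thereby loss of chain information)
--     """
--     # Walk each substitution chain iteratively instead of building a graph
--     # and recursing: every key has exactly one successor.
--     visited = set()
--     order = []
--     for start in substitutions:
--         chain = []
--         node = start
--         while node not in visited: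
--             visited.add(node)
--             chain.append(node)
--             if node not in substitutions:
--                 break
--             node = substitutions[node]
--         order.extend(reversed(chain))
--     return {node: substitutions[node] for node in order if node in substitutions}
-- ===== Notes on version B (the rewrite author's own statement) =====
-- stated objective: simpler
-- what changed: Replaces the explicitly built dependency graph plus recursive DFS with post-order deque with a direct iterative walk along each substitution chain (every key has exactly one successor), emitting each chain in reverse; Pre_ only excludes association lists with duplicate keys, which do not represent a Python dict.
import Mathlib
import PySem

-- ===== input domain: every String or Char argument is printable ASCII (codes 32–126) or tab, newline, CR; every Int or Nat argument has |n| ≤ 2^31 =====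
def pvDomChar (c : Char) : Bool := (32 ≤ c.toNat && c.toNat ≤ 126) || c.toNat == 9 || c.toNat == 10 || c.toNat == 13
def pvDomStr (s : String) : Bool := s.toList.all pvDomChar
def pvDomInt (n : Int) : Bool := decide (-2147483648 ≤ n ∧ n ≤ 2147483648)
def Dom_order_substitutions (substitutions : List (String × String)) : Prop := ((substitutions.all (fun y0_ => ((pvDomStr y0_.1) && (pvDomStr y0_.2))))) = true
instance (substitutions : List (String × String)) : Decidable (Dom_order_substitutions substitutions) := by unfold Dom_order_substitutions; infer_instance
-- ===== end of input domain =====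

-- B replaces A's built dependency graph + recursive DFS with an iterative walk along each
-- substitution chain (objective: simpler). Equivalence is about the return value.

-- ===== PORT A =====
-- the recursive `visit`: fuel only makes the recursion total in Lean; with the fuel the
-- ports pass (length+1) it is never exhausted, since each call visits a fresh node
def pvVisitA (graph : PySem.Dict String (List String)) :
    Nat → String → PySem.Set String × List String → PySem.Set String × List String
  | 0, _, st => st
  | fuel+1, node, st =>
    if PySem.Set.contains st.1 node then st
    else
      let st1 : PySem.Set String × List String := (PySem.Set.add st.1 node, st.2)
      let st2 := (graph.getD node []).foldl (fun s nb => pvVisitA graph fuel nb s) st1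
      (st2.1, node :: st2.2)  -- stack.appendleft(node)

def order_substitutions (substitutions : List (String × String)) : List (String × String) :=
  -- graph = defaultdict(list); for src, dest in substitutions.items(): graph[src].append(dest)
  let graph := substitutions.foldl
    (fun (g : PySem.Dict String (List String)) p => g.modify p.1 [] (· ++ [p.2]))
    PySem.Dict.empty
  -- for node in list(graph.keys()): visit(node)
  let st := graph.keys.foldl (fun s node => pvVisitA graph (substitutions.length + 1) node s)
    ((PySem.Set.empty : PySem.Set String), ([] : List String))
  -- result = {}; for node in reversed(stack): if node in substitutions: result[node] = substitutions[node]
  let subs := PySem.Dict.mk substitutions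
  (st.2.reverse.foldl (fun (res : PySem.Dict String String) node =>
      match subs.get? node with
      | some v => res.insert node v
      | none => res) PySem.Dict.empty).items

-- ===== PORT B =====
-- the while-loop of Source B: walk the chain from `node`, collecting it in `chain`
def pvWalkB (subs : PySem.Dict String String) :
    Nat → String → PySem.Set String → List String → PySem.Set String × List String
  | 0, _, visited, chain => (visited, chain)
  | fuel+1, node, visited, chain =>
    if PySem.Set.contains visited node then (visited, chain)
    else
      let visited' := PySem.Set.add visited node
      let chain' := chain ++ [node]
      match subs.get? node with
      | none => (visited', chain')
      | some nxt => pvWalkB subs fuel nxt visited' chain'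

def order_substitutions_alt (substitutions : List (String × String)) : List (String × String) :=
  let subs := PySem.Dict.mk substitutions
  -- for start in substitutions: …; order.extend(reversed(chain))
  let st := substitutions.foldl
    (fun (s : PySem.Set String × List String) p =>
      let c := pvWalkB subs (substitutions.length + 1) p.1 s.1 []
      (c.1, s.2 ++ c.2.reverse))
    ((PySem.Set.empty : PySem.Set String), ([] : List String))
  -- {node: substitutions[node] for node in order if node in substitutions}
  (st.2.foldl (fun (res : PySem.Dict String String) node =>
      match subs.get? node with
      | some v => res.insert node v
      | none => res) PySem.Dict.empty).items

-- ===== PRECONDITION & SPEC =====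
-- Pre_ excludes association lists with duplicate keys: they do not represent a Python dict
-- (A's parameter is a dict, which cannot hold duplicate keys), so nothing is excluded that
-- the Python function actually accepts.
def Pre_order_substitutions (substitutions : List (String × String)) : Prop :=
  (substitutions.map Prod.fst).Nodup
instance (substitutions : List (String × String)) : Decidable (Pre_order_substitutions substitutions) := by
  unfold Pre_order_substitutions; infer_instance

def pvWitness_order_substitutions : (List (String × String)) := [("A", "B"), ("B", "C")]

def Spec_order_substitutions (substitutions : List (String × String)) (out : List (String × String)) : Prop := out = order_substitutions_alt substitutions
instance (substitutions : List (String × String)) (out : List (String × String)) : Decidable (Spec_order_substitutions substitutions out) := by unfold Spec_order_substitutions; infer_instance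

-- ===== CLAIM (what is proved, stated in full; the proofs are below) =====
def Claim_equal_order_substitutions : Prop := ∀ (substitutions : List (String × String)), Dom_order_substitutions substitutions → Pre_order_substitutions substitutions → Spec_order_substitutions substitutions (order_substitutions substitutions)

-- ===== LEMMAS AND PROOFS =====

-- the chain accumulator of pvWalkB is a pure prefix
theorem pvWalkB_acc (subs : PySem.Dict String String) (fuel : Nat) :
    ∀ (node : String) (visited : PySem.Set String) (chain : List String),
    pvWalkB subs fuel node visited chain =
      ((pvWalkB subs fuel node visited []).1, chain ++ (pvWalkB subs fuel node visited []).2) := by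
  induction fuel with
  | zero => intro node visited chain; simp [pvWalkB]
  | succ fuel ih =>
    intro node visited chain
    simp only [pvWalkB]
    by_cases h : node ∈ visited
    · simp [h]
    · simp only [PySem.Set.contains_eq_listContains, List.contains_eq_mem, h, decide_false,
        Bool.false_eq_true, if_false]
      cases hg : subs.get? node with
      | none => simp
      | some nxt =>
        dsimp only
        rw [ih nxt (PySem.Set.add visited node) (chain ++ [node]),
            ih nxt (PySem.Set.add visited node) ([] ++ [node])]
        simp

-- with Nodup keys, the graph rows built by A are exactly the (at most one) dict successor
theorem pvFilter_eq_get? (l : List (String × String)) (c : String)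
    (h : (l.map Prod.fst).Nodup) :
    (l.filter (fun p => p.1 == c)).map Prod.snd = ((PySem.Dict.mk l).get? c).toList := by
  induction l with
  | nil => simp [PySem.Dict.get?]
  | cons p t ih =>
    obtain ⟨k, v⟩ := p
    simp only [List.map_cons, List.nodup_cons] at h
    rw [PySem.Dict.get?_mk_cons]
    by_cases hk : k == c
    · have hkc : k = c := by simpa using hk
      subst hkc
      have ht : t.filter (fun p => p.1 == k) = [] := by
        rw [List.filter_eq_nil_iff]
        intro p hp hpk
        exact h.1 (by
          have hp1 : p.1 = k := by simpa using hpk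
          exact hp1 ▸ List.mem_map_of_mem hp)
      simp [ht]
    · simp only [List.filter_cons, hk, Bool.false_eq_true, if_false]
      rw [ih h.2]

-- core correspondence: A's recursive visit equals B's iterative walk, chain prepended to the stack
theorem pvVisitA_eq_walkB (graph : PySem.Dict String (List String))
    (subs : PySem.Dict String String)
    (hg : ∀ n, graph.getD n [] = ((subs.get? n).toList : List String)) (fuel : Nat) :
    ∀ (node : String) (visited : PySem.Set String) (stack : List String),
    pvVisitA graph fuel node (visited, stack) =
      ((pvWalkB subs fuel node visited []).1, (pvWalkB subs fuel node visited []).2 ++ stack) := by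
  induction fuel with
  | zero => intro node visited stack; simp [pvVisitA, pvWalkB]
  | succ fuel ih =>
    intro node visited stack
    simp only [pvVisitA, pvWalkB]
    by_cases h : node ∈ visited
    · simp [h]
    · simp only [PySem.Set.contains_eq_listContains, List.contains_eq_mem, h, decide_false,
        Bool.false_eq_true, if_false]
      rw [hg node]
      cases hgn : subs.get? node with
      | none => simp
      | some nxt =>
        simp only [Option.toList, List.foldl_cons, List.foldl_nil]
        rw [ih nxt (PySem.Set.add visited node) stack]
        rw [pvWalkB_acc subs fuel nxt (PySem.Set.add visited node) ([] ++ [node])]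
        simp

-- the outer loops: A folds visit over the keys, B folds the walk (reversed chain appended)
theorem pvOuter_eq (graph : PySem.Dict String (List String))
    (subs : PySem.Dict String String) (fuel : Nat)
    (hg : ∀ n, graph.getD n [] = ((subs.get? n).toList : List String)) :
    ∀ (ks : List String) (visited : PySem.Set String) (s o : List String), o = s.reverse →
    (ks.foldl (fun st node => pvVisitA graph fuel node st) (visited, s)).1
      = (ks.foldl (fun st node =>
            ((pvWalkB subs fuel node st.1 []).1,
              st.2 ++ (pvWalkB subs fuel node st.1 []).2.reverse)) (visited, o)).1
    ∧ (ks.foldl (fun st node => pvVisitA graph fuel node st) (visited, s)).2.reverse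
      = (ks.foldl (fun st node =>
            ((pvWalkB subs fuel node st.1 []).1,
              st.2 ++ (pvWalkB subs fuel node st.1 []).2.reverse)) (visited, o)).2 := by
  intro ks
  induction ks with
  | nil => intro visited s o ho; simp [ho]
  | cons k t ih =>
    intro visited s o ho
    simp only [List.foldl_cons]
    rw [pvVisitA_eq_walkB graph subs hg fuel k visited s]
    exact ih _ _ _ (by simp [ho])

theorem order_substitutions_spec_aux (substitutions : List (String × String))
    (hpre : (substitutions.map Prod.fst).Nodup) :
    order_substitutions substitutions = order_substitutions_alt substitutions := by
  unfold order_substitutions order_substitutions_alt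
  dsimp only
  set subs := PySem.Dict.mk substitutions with hsubs
  set graph := substitutions.foldl
    (fun (g : PySem.Dict String (List String)) p => g.modify p.1 [] (· ++ [p.2]))
    PySem.Dict.empty with hgraph
  have hg : ∀ n, graph.getD n [] = ((subs.get? n).toList : List String) := by
    intro n
    rw [hgraph, PySem.Dict.getD_foldl_modify_append, PySem.Dict.getD_empty]
    rw [List.nil_append]
    exact pvFilter_eq_get? substitutions n hpre
  have hkeys : graph.keys = substitutions.map Prod.fst := by
    rw [hgraph, PySem.Dict.keys_foldl_modify_key]
    rw [PySem.Dict.keys_empty]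
    rw [PySem.Set.update_nil_left]
    exact PySem.Set.ofList_eq_self_of_nodup _ hpre
  have hB : substitutions.foldl
      (fun (s : PySem.Set String × List String) p =>
        ((pvWalkB subs (substitutions.length + 1) p.1 s.1 []).1,
          s.2 ++ (pvWalkB subs (substitutions.length + 1) p.1 s.1 []).2.reverse))
      ((PySem.Set.empty : PySem.Set String), ([] : List String))
      = (substitutions.map Prod.fst).foldl
        (fun (st : PySem.Set String × List String) node =>
          ((pvWalkB subs (substitutions.length + 1) node st.1 []).1,
            st.2 ++ (pvWalkB subs (substitutions.length + 1) node st.1 []).2.reverse))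
        ((PySem.Set.empty : PySem.Set String), ([] : List String)) :=
    by rw [List.foldl_map]
  have hmain := (pvOuter_eq graph subs (substitutions.length + 1) hg
    (substitutions.map Prod.fst) PySem.Set.empty [] [] rfl).2
  rw [hkeys, hmain, hB]

-- ===== VERDICT (by name: the statement is the Claim_ definition above) =====
theorem order_substitutions_spec : Claim_equal_order_substitutions := by
  intro substitutions _ hpre
  unfold Spec_order_substitutions
  exact order_substitutions_spec_aux substitutions hpre
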